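-- pv_equiv track=rewrite | github.com/AleksNest/Python_AdvancedLevel | Homework/Seminar_2/Task_2_7_2.py | shortenFraction
-- ===== SOURCE A (Python) =====
-- def shortenFraction(n: int, m: int):                    # метод сокращения дроби
--     if n > m:
--         k = n
--     else:
--         k = m
--     while k != 1:
--         if n % k == 0 and m % k == 0:
--             return str(n // k) + "/" + str(m // k)
--         else:
--             k -= 1
--     return str(n) + "/" + str(m)
-- ===== SOURCE B (Python) =====
-- def shortenFraction(n: int, m: int):
--     # Euclidean algorithm: O(log min(n,m)) instead of A's linear downward scan.
--     a, b = n, m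
--     while b:
--         a, b = b, a % b
--     g = abs(a)
--     return str(n // g) + "/" + str(m // g)
-- ===== Notes on version B (the rewrite author's own statement) =====
-- stated objective: faster
-- what changed: Replaced A's linear downward scan for the largest common divisor (trial division from max(n,m) down to 1) by the Euclidean algorithm followed by one division of each part.
-- outside the precondition, e.g. on shortenFraction(-2, -4): A returns '1/2', B returns '-1/-2'; on shortenFraction(0, 0): A raises ZeroDivisionError, B raises ZeroDivisionError; on shortenFraction(-3, -2): A does not finish within the time limit, B returns '-3/-2'
import Mathlib
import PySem

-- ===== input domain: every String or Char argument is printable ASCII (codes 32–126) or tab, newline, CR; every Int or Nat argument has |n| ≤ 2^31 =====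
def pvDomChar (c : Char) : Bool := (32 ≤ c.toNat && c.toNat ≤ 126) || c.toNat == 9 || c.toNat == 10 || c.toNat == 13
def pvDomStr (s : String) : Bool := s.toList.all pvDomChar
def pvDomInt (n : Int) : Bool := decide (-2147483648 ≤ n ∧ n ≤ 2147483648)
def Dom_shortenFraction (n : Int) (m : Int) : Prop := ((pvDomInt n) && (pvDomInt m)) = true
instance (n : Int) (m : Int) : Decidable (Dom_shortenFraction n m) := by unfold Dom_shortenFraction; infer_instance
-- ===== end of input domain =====

-- B replaces A's linear downward trial-division scan by the Euclidean algorithm (objective: faster, asymptotic).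

-- ===== PORT A =====
-- A's while-loop: k counts down from max(n,m); structural recursion on k : Nat
-- (under Pre_ the initial k is ≥ 1, so k.toNat is the exact Python value and the
-- k = 0 base case is never reached).
def shortenFractionLoop (n m : Int) : Nat → String
  | 0 => PySem.Int.toStr n ++ "/" ++ PySem.Int.toStr m          -- unreachable under Pre_
  | 1 => PySem.Int.toStr n ++ "/" ++ PySem.Int.toStr m          -- while-exit: k = 1
  | (k+2) =>
      if PySem.Int.mod n ((k : Int)+2) = 0 ∧ PySem.Int.mod m ((k : Int)+2) = 0 then
        PySem.Int.toStr (PySem.Int.floordiv n ((k : Int)+2)) ++ "/" ++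
          PySem.Int.toStr (PySem.Int.floordiv m ((k : Int)+2))
      else
        shortenFractionLoop n m (k+1)

def shortenFraction (n : Int) (m : Int) : String :=
  let k : Int := if n > m then n else m
  shortenFractionLoop n m k.toNat

-- ===== PORT B =====
-- termination measure for the Euclidean loop: |a % b| < |b| for b ≠ 0 (Python mod)
theorem pymod_natAbs_lt (a b : Int) (hb : b ≠ 0) : (PySem.Int.mod a b).natAbs < b.natAbs := by
  have hmod : PySem.Int.mod a b = Int.fmod a b := rfl
  have h1 : 0 ≤ a % b := Int.emod_nonneg a hb
  have h2 : a % b < |b| := Int.emod_lt_abs a hb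
  have habs : |b| = (b.natAbs : Int) := Int.abs_eq_natAbs b
  rw [hmod, Int.fmod_eq_emod]
  split_ifs <;> omega

-- Source B's 'while b: a, b = b, a % b'
def gcdLoop (a b : Int) : Int :=
  if b = 0 then a else gcdLoop b (PySem.Int.mod a b)
termination_by b.natAbs
decreasing_by exact pymod_natAbs_lt a b (by assumption)

def shortenFraction_alt (n : Int) (m : Int) : String :=
  let a := gcdLoop n m
  let g : Int := |a|
  PySem.Int.toStr (PySem.Int.floordiv n g) ++ "/" ++ PySem.Int.toStr (PySem.Int.floordiv m g)

-- ===== PRECONDITION & SPEC =====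
-- Pre_ excludes the inputs with max(n,m) ≤ 0: there A raises ZeroDivisionError (max = 0),
-- loops forever (most pairs of negatives), or — only when max(n,m) itself happens to divide
-- both — returns a sign-flipped value that is an accident of scanning down from a negative k.
def Pre_shortenFraction (n : Int) (m : Int) : Prop := 1 ≤ n ∨ 1 ≤ m
instance (n : Int) (m : Int) : Decidable (Pre_shortenFraction n m) := by unfold Pre_shortenFraction; infer_instance
def pvWitness_shortenFraction : Int × Int := (6, 4)

def Spec_shortenFraction (n : Int) (m : Int) (out : String) : Prop := out = shortenFraction_alt n m
instance (n : Int) (m : Int) (out : String) : Decidable (Spec_shortenFraction n m out) := by unfold Spec_shortenFraction; infer_instance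

-- ===== CLAIM (what is proved, stated in full; the proofs are below) =====
def Claim_equal_shortenFraction : Prop := ∀ (n : Int) (m : Int), Dom_shortenFraction n m → Pre_shortenFraction n m → Spec_shortenFraction n m (shortenFraction n m)

-- ===== LEMMAS AND PROOFS =====

theorem gcdLoop_natAbs (a b : Int) : (gcdLoop a b).natAbs = Int.gcd a b := by
  fun_induction gcdLoop a b with
  | case1 a => simp [Int.gcd]
  | case2 a b hb ih =>
      rw [ih]
      have hmod : PySem.Int.mod a b = Int.fmod a b := rfl
      have hdecomp : Int.fmod a b + b * Int.fdiv a b = a := Int.fmod_add_mul_fdiv a b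
      calc Int.gcd b (PySem.Int.mod a b)
          = Int.gcd (PySem.Int.mod a b) b := Int.gcd_comm _ _
        _ = Int.gcd (Int.fmod a b + b * Int.fdiv a b) b := by
              rw [hmod, Int.gcd_add_mul_left_left]
        _ = Int.gcd a b := by rw [hdecomp]

theorem loop_eq (n m : Int) (hg1 : 1 ≤ Int.gcd n m) :
    ∀ k : Nat, 1 ≤ k → Int.gcd n m ≤ k →
      shortenFractionLoop n m k =
        PySem.Int.toStr (PySem.Int.floordiv n (Int.gcd n m)) ++ "/" ++
          PySem.Int.toStr (PySem.Int.floordiv m (Int.gcd n m)) := by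
  intro k
  induction k with
  | zero => omega
  | succ k ih =>
    intro _ hle
    match k, ih with
    | 0, _ =>
      have hg : Int.gcd n m = 1 := by omega
      simp [shortenFractionLoop, hg, PySem.Int.floordiv, Int.fdiv_one]
    | (k+1), ih =>
      rw [shortenFractionLoop]
      split_ifs with h
      · -- k+2 divides both, hence k+2 ≤ gcd, hence gcd = k+2
        obtain ⟨h1, h2⟩ := h
        have d1 : ((k : Int)+2) ∣ n := (PySem.Int.mod_eq_zero_iff_dvd n _).mp h1
        have d2 : ((k : Int)+2) ∣ m := (PySem.Int.mod_eq_zero_iff_dvd m _).mp h2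
        have hdg : ((k : Int)+2) ∣ (Int.gcd n m : Int) := by
          exact_mod_cast Int.dvd_gcd d1 d2
        have hle2 : (k : Int)+2 ≤ (Int.gcd n m : Int) :=
          Int.le_of_dvd (by exact_mod_cast hg1) hdg
        have heq : (Int.gcd n m : Int) = (k : Int)+2 := by
          have : (Int.gcd n m : Int) ≤ (k : Int)+2 := by exact_mod_cast hle
          omega
        rw [show ((k : Int)+2) = (Int.gcd n m : Int) from heq.symm]
      · -- gcd ≠ k+2 (gcd divides both), so gcd ≤ k+1: recurse
        have hne : (Int.gcd n m : Int) ≠ (k : Int)+2 := by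
          intro he
          apply h
          constructor
          · exact (PySem.Int.mod_eq_zero_iff_dvd n _).mpr (he ▸ Int.gcd_dvd_left n m)
          · exact (PySem.Int.mod_eq_zero_iff_dvd m _).mpr (he ▸ Int.gcd_dvd_right n m)
        have : Int.gcd n m ≤ k+1 := by
          have : (Int.gcd n m : Int) ≤ (k : Int)+2 := by exact_mod_cast hle
          omega
        exact ih (by omega) this

-- ===== VERDICT (by name: the statement is the Claim_ definition above) =====
theorem shortenFraction_spec : Claim_equal_shortenFraction := by
  intro n m _ hpre
  unfold Spec_shortenFraction shortenFraction shortenFraction_alt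
  show shortenFractionLoop n m (if n > m then n else m).toNat =
    PySem.Int.toStr (PySem.Int.floordiv n |gcdLoop n m|) ++ "/" ++
      PySem.Int.toStr (PySem.Int.floordiv m |gcdLoop n m|)
  have hnz : ¬ (n = 0 ∧ m = 0) := by rintro ⟨rfl, rfl⟩; rcases hpre with h | h <;> omega
  have hg1 : 1 ≤ Int.gcd n m := by
    rcases Nat.eq_zero_or_pos (Int.gcd n m) with h | h
    · exact absurd (Int.gcd_eq_zero_iff.mp h) (by simpa using hnz)
    · omega
  -- gcd ≤ max(n,m)
  set K : Int := if n > m then n else m with hK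
  have hK1 : 1 ≤ K := by rcases hpre with h | h <;> simp only [hK] <;> split <;> omega
  have hgK : (Int.gcd n m : Int) ≤ K := by
    rcases hpre with h | h
    · have : (Int.gcd n m : Int) ≤ n := Int.le_of_dvd (by omega) (Int.gcd_dvd_left n m)
      simp only [hK]; split <;> omega
    · have : (Int.gcd n m : Int) ≤ m := Int.le_of_dvd (by omega) (Int.gcd_dvd_right n m)
      simp only [hK]; split <;> omega
  have habs : |gcdLoop n m| = (Int.gcd n m : Int) := by
    rw [Int.abs_eq_natAbs, gcdLoop_natAbs]
  rw [habs]
  exact loop_eq n m hg1 K.toNat (by omega) (by omega)
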